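-- pv_equiv track=rewrite | github.com/PleaseInput/ImplementationOfIRSA | HuffmanCoding.py | decompressText
-- ===== SOURCE A (Python) =====
-- def decompressText(reversedCode, textAfterHC):
--     currentCode = ''
--     textBeforeHC = ''
--     for chr in textAfterHC:
--         currentCode += chr
--         if currentCode in reversedCode:
--             textBeforeHC += reversedCode[currentCode]
--             currentCode = ''
--
--     return textBeforeHC
-- ===== SOURCE B (Python) =====
-- def decompressText(reversedCode, textAfterHC):
--     # Trie-based decoder: build a prefix tree of the codes once, then decode
--     # with a single node-pointer walk instead of growing a string and doing a
--     # dict lookup per symbol.  The value of a code is stored under the key None.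
--     root = {}
--     for code, ch in reversedCode.items():
--         node = root
--         for sym in code:
--             node = node.setdefault(sym, {})
--         node[None] = ch
--     out = ''
--     node = root
--     for sym in textAfterHC:
--         node = node.get(sym) if node is not None else None
--         if node is not None and None in node:
--             out += node[None]
--             node = root
--     return out
-- ===== Notes on version B (the rewrite author's own statement) =====
-- stated objective: faster
-- what changed: Replaces the per-symbol rebuild of a growing currentCode string with its dict lookup by a prefix trie built once from the codes, decoded with a single node-pointer walk that emits at value-carrying nodes and resets to the root.
import Mathlib
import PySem

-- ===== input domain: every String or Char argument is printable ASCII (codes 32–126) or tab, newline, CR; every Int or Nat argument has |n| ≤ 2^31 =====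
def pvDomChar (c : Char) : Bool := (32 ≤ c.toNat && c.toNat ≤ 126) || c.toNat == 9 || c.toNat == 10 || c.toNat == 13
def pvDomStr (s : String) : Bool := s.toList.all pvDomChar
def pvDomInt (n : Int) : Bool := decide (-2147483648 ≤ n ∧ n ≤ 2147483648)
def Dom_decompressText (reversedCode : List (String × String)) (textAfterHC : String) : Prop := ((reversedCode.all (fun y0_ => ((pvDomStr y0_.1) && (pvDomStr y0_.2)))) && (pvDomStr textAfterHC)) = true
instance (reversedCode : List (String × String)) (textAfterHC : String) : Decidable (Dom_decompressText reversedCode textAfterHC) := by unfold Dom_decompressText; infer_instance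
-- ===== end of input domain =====

-- B replaces A's growing-prefix dict lookups by a code trie decoded with one node-pointer walk (alternative data structure, same results).

-- ===== PORT A =====
-- Strings are handled on the List Char side per the PySem convention; the Python
-- dict argument (encoded as an assoc list) is rebuilt with PySem.Dict.ofList,
-- which is exactly dict construction (insertion order, overwrite in place).
def decompressText (reversedCode : List (String × String)) (textAfterHC : String) : String :=
  let d : PySem.Dict (List Char) String :=
    PySem.Dict.ofList (reversedCode.map (fun p => (p.1.toList, p.2)))
  let r := textAfterHC.toList.foldl
    (fun (st : List Char × List Char) c =>
      let cur := st.1 ++ [c]                -- currentCode += chr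
      if d.contains cur then                -- if currentCode in reversedCode
        ([], st.2 ++ (d.getD cur "").toList)  -- emit reversedCode[currentCode], reset
      else (cur, st.2))
    ([], [])
  String.ofList r.2

-- ===== PORT B =====
-- Trie nodes: Source B's dict node {sym: child, None: value}; an absent child
-- (Python None) is the `nil` constructor, the None-key value slot is `val`.
inductive Trie where
  | nil
  | node (val : Option String) (children : Char → Trie)

def Trie.insert : Trie → List Char → String → Trie
  | .nil, [], v => .node (some v) (fun _ => .nil)
  | .node _ ch, [], v => .node (some v) ch
  | .nil, c :: cs, v => .node none (fun c' => if c' = c then Trie.insert .nil cs v else .nil)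
  | .node val ch, c :: cs, v => .node val (fun c' => if c' = c then Trie.insert (ch c) cs v else ch c')

def Trie.child : Trie → Char → Trie
  | .nil, _ => .nil
  | .node _ ch, c => ch c

def decompressText_alt (reversedCode : List (String × String)) (textAfterHC : String) : String :=
  let root := reversedCode.foldl (fun t p => t.insert p.1.toList p.2) Trie.nil
  let r := textAfterHC.toList.foldl
    (fun (st : Trie × List Char) c =>
      match st.1.child c with                    -- node = node.get(sym) (nil when dead)
      | .nil => (Trie.nil, st.2)
      | .node none ch => (.node none ch, st.2)
      | .node (some v) _ => (root, st.2 ++ v.toList))  -- emit, reset to root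
    (root, [])
  String.ofList r.2

-- ===== PRECONDITION & SPEC =====
def Spec_decompressText (reversedCode : List (String × String)) (textAfterHC : String) (out : String) : Prop := out = decompressText_alt reversedCode textAfterHC
instance (reversedCode : List (String × String)) (textAfterHC : String) (out : String) : Decidable (Spec_decompressText reversedCode textAfterHC out) := by unfold Spec_decompressText; infer_instance

-- ===== CLAIM (what is proved, stated in full; the proofs are below) =====
def Claim_equal_decompressText : Prop := ∀ (reversedCode : List (String × String)) (textAfterHC : String), Dom_decompressText reversedCode textAfterHC → Spec_decompressText reversedCode textAfterHC (decompressText reversedCode textAfterHC)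

-- ===== LEMMAS AND PROOFS =====

def Trie.valAt : Trie → List Char → Option String
  | .nil, _ => none
  | .node v _, [] => v
  | .node _ ch, c :: cs => Trie.valAt (ch c) cs

def Trie.val0 : Trie → Option String
  | .nil => none
  | .node v _ => v

def Trie.descend (t : Trie) (s : List Char) : Trie := s.foldl Trie.child t

theorem Trie.valAt_nil (s : List Char) : Trie.valAt .nil s = none := by cases s <;> rfl

theorem Trie.valAt_insert (ks : List Char) (t : Trie) (v : String) (s : List Char) :
    (t.insert ks v).valAt s = if s = ks then some v else t.valAt s := by
  induction ks generalizing t s with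
  | nil =>
    cases t <;> cases s <;> simp [Trie.insert, Trie.valAt]
  | cons c cs ih =>
    cases t with
    | nil =>
      cases s with
      | nil => simp [Trie.insert, Trie.valAt]
      | cons c' cs' =>
        by_cases hc : c' = c
        · subst hc
          simp [Trie.insert, Trie.valAt, ih]
        · simp [Trie.insert, Trie.valAt, hc, Trie.valAt_nil]
    | node val ch =>
      cases s with
      | nil => simp [Trie.insert, Trie.valAt]
      | cons c' cs' =>
        by_cases hc : c' = c
        · subst hc
          simp [Trie.insert, Trie.valAt, ih]
        · simp [Trie.insert, Trie.valAt, hc]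

theorem Trie.valAt_build (ps : List (List Char × String)) (t : Trie)
    (d : PySem.Dict (List Char) String) (h : ∀ s, t.valAt s = d.get? s) (s : List Char) :
    (ps.foldl (fun t p => t.insert p.1 p.2) t).valAt s
      = (ps.foldl (fun d p => d.insert p.1 p.2) d).get? s := by
  induction ps generalizing t d with
  | nil => exact h s
  | cons p ps ih =>
    refine ih _ _ (fun s => ?_)
    rw [Trie.valAt_insert, PySem.Dict.get?_insert, h]

theorem Trie.valAt_eq_descend (s : List Char) (t : Trie) :
    t.valAt s = (t.descend s).val0 := by
  induction s generalizing t with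
  | nil => cases t <;> rfl
  | cons c cs ih =>
    have hstep : t.valAt (c :: cs) = (t.child c).valAt cs := by
      cases t <;> simp [Trie.valAt, Trie.child, Trie.valAt_nil]
    rw [hstep, ih]
    rfl

theorem Trie.descend_concat (t : Trie) (s : List Char) (c : Char) :
    t.descend (s ++ [c]) = (t.descend s).child c := by
  simp [Trie.descend]

-- the decode loops agree, with B's node pointer tracking A's currentCode through the trie
theorem decode_loop_eq (root : Trie) (d : PySem.Dict (List Char) String)
    (hval : ∀ s, root.valAt s = d.get? s) (cs : List Char) (cur out : List Char) :
    (cs.foldl (fun (st : List Char × List Char) c =>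
        let cur := st.1 ++ [c]
        if d.contains cur then ([], st.2 ++ (d.getD cur "").toList)
        else (cur, st.2)) (cur, out)).2
      = (cs.foldl (fun (st : Trie × List Char) c =>
          match st.1.child c with
          | .nil => (Trie.nil, st.2)
          | .node none ch => (.node none ch, st.2)
          | .node (some v) _ => (root, st.2 ++ v.toList)) (root.descend cur, out)).2 := by
  induction cs generalizing cur out with
  | nil => rfl
  | cons c cs ih =>
    simp only [List.foldl_cons]
    have hchild : (root.descend cur).child c = root.descend (cur ++ [c]) :=
      (Trie.descend_concat root cur c).symm
    have hcont : d.contains (cur ++ [c]) = (root.descend (cur ++ [c])).val0.isSome := by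
      rw [PySem.Dict.contains_eq_isSome_get?, ← hval, Trie.valAt_eq_descend]
    have hgetD : d.getD (cur ++ [c]) "" = (root.descend (cur ++ [c])).val0.getD "" := by
      rw [PySem.Dict.getD_eq_get?_getD, ← hval, Trie.valAt_eq_descend]
    rw [hchild]
    cases hd : root.descend (cur ++ [c]) with
    | nil =>
      have hf : d.contains (cur ++ [c]) = false := by rw [hcont, hd]; rfl
      have h2 := ih (cur ++ [c]) out
      rw [hd] at h2
      simpa [hf] using h2
    | node v ch =>
      cases v with
      | none =>
        have hf : d.contains (cur ++ [c]) = false := by rw [hcont, hd]; rfl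
        have h2 := ih (cur ++ [c]) out
        rw [hd] at h2
        simpa [hf] using h2
      | some v =>
        have ht : d.contains (cur ++ [c]) = true := by rw [hcont, hd]; rfl
        have hv : d.getD (cur ++ [c]) "" = v := by rw [hgetD, hd]; rfl
        have h2 := ih ([] : List Char) (out ++ v.toList)
        simpa [ht, hv, Trie.descend] using h2

-- ===== VERDICT (by name: the statement is the Claim_ definition above) =====
theorem decompressText_spec : Claim_equal_decompressText := by
  intro rc text _
  show decompressText rc text = decompressText_alt rc text
  unfold decompressText decompressText_alt
  have hroot : rc.foldl (fun t p => t.insert p.1.toList p.2) Trie.nil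
      = (rc.map (fun p => (p.1.toList, p.2))).foldl (fun t p => t.insert p.1 p.2) Trie.nil := by
    rw [List.foldl_map]
  have hval : ∀ s, (rc.foldl (fun t p => t.insert p.1.toList p.2) Trie.nil).valAt s
      = (PySem.Dict.ofList (rc.map (fun p => (p.1.toList, p.2)))).get? s := by
    intro s
    rw [hroot]
    exact Trie.valAt_build _ Trie.nil PySem.Dict.empty
      (fun s => by rw [Trie.valAt_nil]; rfl) s
  have h := decode_loop_eq (rc.foldl (fun t p => t.insert p.1.toList p.2) Trie.nil)
    (PySem.Dict.ofList (rc.map (fun p => (p.1.toList, p.2)))) hval text.toList [] []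
  simp only [Trie.descend, List.foldl_nil] at h
  exact congrArg String.ofList h
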